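-- pv_equiv track=rewrite | github.com/MeesVanHaeren/AOC2025 | solutions/day2/solution.py | getInvalidIds
-- ===== SOURCE A (Python) =====
-- def isValid(numberString):
--     if len(numberString) % 2 != 0:
--         return True
--
--     return numberString[:int(len(numberString)/2)] != numberString[int(len(numberString)/2):]
--
-- def getInvalidIds(low, high):
--     i = low
--     invalidIds = []
--
--     while i <= high:
--         if not isValid(str(i)):
--             invalidIds.append(i)
--         i += 1
--     return invalidIds
-- ===== SOURCE B (Python) =====
-- def getInvalidIds(low, high):
--     # Invalid ids are exactly the numbers whose decimal string is some half
--     # repeated twice: n = h * (10**d + 1) with h a d-digit number.  Generate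
--     # them directly, in increasing order, instead of scanning the whole range.
--     invalidIds = []
--     maxHalf = len(str(high)) // 2
--     for d in range(1, maxHalf + 1):
--         m = 10 ** d + 1
--         for h in range(10 ** (d - 1), 10 ** d):
--             n = h * m
--             if n > high:
--                 break
--             if n >= low:
--                 invalidIds.append(n)
--     return invalidIds
-- ===== Notes on version B (the rewrite author's own statement) =====
-- stated objective: faster
-- what changed: Instead of scanning every integer in [low, high] and testing its decimal string for a doubled half, B directly generates the invalid ids as h*(10**d+1) for each d-digit half h, in increasing order.
import Mathlib
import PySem

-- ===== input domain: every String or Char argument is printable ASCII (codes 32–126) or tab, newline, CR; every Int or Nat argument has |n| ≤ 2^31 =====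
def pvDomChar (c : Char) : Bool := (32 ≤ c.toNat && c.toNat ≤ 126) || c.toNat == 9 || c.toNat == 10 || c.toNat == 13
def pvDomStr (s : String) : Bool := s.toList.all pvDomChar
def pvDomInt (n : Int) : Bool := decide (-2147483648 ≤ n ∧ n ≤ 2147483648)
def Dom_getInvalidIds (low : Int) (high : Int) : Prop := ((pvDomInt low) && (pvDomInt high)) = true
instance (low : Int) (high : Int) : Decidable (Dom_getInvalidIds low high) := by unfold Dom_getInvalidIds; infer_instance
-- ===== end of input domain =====

-- B replaces A's scan of every integer in [low, high] by directly generating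
-- the numbers whose decimal string is a half repeated twice (objective: faster).

-- ===== PORT A =====
-- isValid(numberString); the two string slices are compared as their character
-- lists (two Strings are equal iff their toLists are); int(len(s)/2) is ported
-- as truncating division, exact since len(s) is a nonnegative integer.
def pvIsValid (s : String) : Bool :=
  if PySem.Int.mod (PySem.Str.len s) 2 ≠ 0 then true
  else
    let half : Int := PySem.Int.truncdiv (PySem.Str.len s) 2
    decide (PySem.List.slice s.toList none (some half) ≠ PySem.List.slice s.toList (some half) none)

-- the `while i <= high` loop, with its accumulator
def pvGoA (high i : Int) (acc : List Int) : List Int :=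
  if _h : i ≤ high then
    pvGoA high (i + 1) (if !pvIsValid (PySem.Int.toStr i) then acc ++ [i] else acc)
  else acc
termination_by (high + 1 - i).toNat
decreasing_by omega

def getInvalidIds (low : Int) (high : Int) : List Int := pvGoA high low []

-- ===== PORT B =====
-- the inner `for h in range(...)` with its `break`, as recursion on the number
-- of remaining values of h
def pvInner (low high m : Int) : Int → Nat → List Int → List Int
  | _, 0, acc => acc
  | h, cnt + 1, acc =>
    let n := h * m
    if n > high then acc
    else pvInner low high m (h + 1) cnt (if n ≥ low then acc ++ [n] else acc)

def getInvalidIds_alt (low : Int) (high : Int) : List Int :=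
  let maxHalf := PySem.Int.floordiv (PySem.Str.len (PySem.Int.toStr high)) 2
  (PySem.List.pyRange 1 (maxHalf + 1)).foldl
    (fun acc d =>
      -- d runs over 1..maxHalf, so the Python exponent d is d.toNat
      let m : Int := 10 ^ d.toNat + 1
      let lo : Int := 10 ^ (d.toNat - 1)
      let hi : Int := 10 ^ d.toNat
      pvInner low high m lo (hi - lo).toNat acc)
    []

-- ===== PRECONDITION & SPEC =====
def Spec_getInvalidIds (low : Int) (high : Int) (out : List Int) : Prop := out = getInvalidIds_alt low high
instance (low : Int) (high : Int) (out : List Int) : Decidable (Spec_getInvalidIds low high out) := by unfold Spec_getInvalidIds; infer_instance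

-- ===== CLAIM (what is proved, stated in full; the proofs are below) =====
def Claim_equal_getInvalidIds : Prop := ∀ (low : Int) (high : Int), Dom_getInvalidIds low high → Spec_getInvalidIds low high (getInvalidIds low high)

-- ===== LEMMAS AND PROOFS =====

-- the boolean A tests: "i is an invalid id"
def pvP (i : Int) : Bool := !pvIsValid (PySem.Int.toStr i)

-- arithmetic characterisation: i's decimal string is some d-digit half twice
def pvIsDbl (i : Int) : Prop :=
  ∃ k h : Nat, 0 < k ∧ 10 ^ (k - 1) ≤ h ∧ h < 10 ^ k ∧ i = ((h * (10 ^ k + 1) : Nat) : Int)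

def pvIntRange (a : Int) (n : Nat) : List Int := (List.range n).map (fun (j : Nat) => a + (j : Int))

def pvBlock (low high : Int) (k : Nat) : List Int :=
  ((pvIntRange ((10 : Int) ^ (k - 1)) (((10 : Int) ^ k - (10 : Int) ^ (k - 1)).toNat)).map
      (fun h => h * ((10 : Int) ^ k + 1))).filter (fun n => decide (low ≤ n ∧ n ≤ high))

lemma pvIntRange_succ (a : Int) (n : Nat) : pvIntRange a (n + 1) = a :: pvIntRange (a + 1) n := by
  simp only [pvIntRange, List.range_succ_eq_map, List.map_cons, List.map_map, Nat.cast_zero,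
    add_zero]
  refine congrArg (List.cons a) (List.map_congr_left fun j _ => ?_)
  simp only [Function.comp_apply]
  push_cast
  ring

lemma pvIntRange_mem {a : Int} {n : Nat} {x : Int} : x ∈ pvIntRange a n ↔ a ≤ x ∧ x < a + n := by
  simp only [pvIntRange, List.mem_map, List.mem_range]
  constructor
  · rintro ⟨j, hj, rfl⟩; omega
  · rintro ⟨h1, h2⟩; exact ⟨(x - a).toNat, by omega, by omega⟩

lemma pvIntRange_pairwise (a : Int) (n : Nat) : (pvIntRange a n).Pairwise (· < ·) := by
  refine (List.pairwise_map).mpr (List.pairwise_lt_range.imp ?_)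
  intro i j h
  omega

-- ---- A's loop is a filter over the integer range ----
lemma pvGoA_spec (high : Int) : ∀ (n : Nat) (i : Int) (acc : List Int),
    (high + 1 - i).toNat = n → pvGoA high i acc = acc ++ (pvIntRange i n).filter pvP := by
  intro n
  induction n with
  | zero =>
    intro i acc hn
    rw [pvGoA]
    simp only [pvIntRange, List.range_zero, List.map_nil, List.filter_nil, List.append_nil]
    rw [dif_neg (by omega)]
  | succ n ih =>
    intro i acc hn
    rw [pvGoA, dif_pos (by omega)]
    rw [ih (i + 1) _ (by omega)]
    rw [pvIntRange_succ, List.filter_cons]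
    show (if pvP i then acc ++ [i] else acc) ++ _ = _
    by_cases hp : pvP i
    · simp [hp]
    · simp [hp]

lemma getInvalidIds_eq_filter (low high : Int) :
    getInvalidIds low high = (pvIntRange low (high + 1 - low).toNat).filter pvP := by
  simpa using pvGoA_spec high (high + 1 - low).toNat low [] rfl

lemma mem_getInvalidIds {low high x : Int} :
    x ∈ getInvalidIds low high ↔ (low ≤ x ∧ x ≤ high) ∧ pvP x := by
  rw [getInvalidIds_eq_filter]
  simp only [List.mem_filter, pvIntRange_mem]
  constructor
  · rintro ⟨⟨h1, h2⟩, h3⟩; exact ⟨⟨h1, by omega⟩, h3⟩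
  · rintro ⟨⟨h1, h2⟩, h3⟩; exact ⟨⟨h1, by omega⟩, h3⟩

lemma getInvalidIds_pairwise (low high : Int) : (getInvalidIds low high).Pairwise (· < ·) := by
  rw [getInvalidIds_eq_filter]
  exact (pvIntRange_pairwise _ _).sublist List.filter_sublist

-- ---- B's inner loop with `break` is a filter over a mapped range ----
lemma pvInner_spec (low high m : Int) (hm : 0 < m) : ∀ (cnt : Nat) (h : Int) (acc : List Int),
    pvInner low high m h cnt acc =
      acc ++ ((pvIntRange h cnt).map (fun x => x * m)).filter (fun n => decide (low ≤ n ∧ n ≤ high)) := by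
  intro cnt
  induction cnt with
  | zero => intro h acc; simp [pvInner, pvIntRange]
  | succ cnt ih =>
    intro h acc
    rw [pvIntRange_succ]
    simp only [pvInner]
    by_cases hbr : h * m > high
    · rw [if_pos hbr]
      have : ∀ x ∈ (pvIntRange h (cnt+1)).map (fun x => x * m),
          ¬ (decide (low ≤ x ∧ x ≤ high) = true) := by
        intro x hx
        simp only [List.mem_map, pvIntRange_mem] at hx
        obtain ⟨y, ⟨hy1, _⟩, rfl⟩ := hx
        have : h * m ≤ y * m := by
          apply mul_le_mul_of_nonneg_right hy1 (le_of_lt hm)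
        simp only [decide_eq_true_eq]; omega
      rw [pvIntRange_succ] at this
      rw [List.filter_eq_nil_iff.mpr this, List.append_nil]
    · rw [if_neg hbr, ih]
      rw [List.map_cons, List.filter_cons]
      by_cases hlo : low ≤ h * m
      · rw [if_pos (show (decide (low ≤ h * m ∧ h * m ≤ high)) = true by
            simp only [decide_eq_true_eq]; exact ⟨hlo, by omega⟩),
          if_pos (show h * m ≥ low from hlo)]
        simp
      · rw [if_neg (show ¬ (decide (low ≤ h * m ∧ h * m ≤ high)) = true by
            simp only [decide_eq_true_eq]; exact fun hc => hlo hc.1),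
          if_neg (show ¬ h * m ≥ low from hlo)]

-- ---- B is the concatenation of the per-half-length blocks ----
lemma getInvalidIds_alt_eq (low high : Int) :
    getInvalidIds_alt low high =
      (PySem.List.pyRange 1 (PySem.Int.floordiv (PySem.Str.len (PySem.Int.toStr high)) 2 + 1)).flatMap
        (fun d => pvBlock low high d.toNat) := by
  have hstep : (fun (acc : List Int) (d : Int) =>
      pvInner low high (10 ^ d.toNat + 1) (10 ^ (d.toNat - 1))
        (((10 : Int) ^ d.toNat - (10 : Int) ^ (d.toNat - 1)).toNat) acc)
      = fun acc d => acc ++ pvBlock low high d.toNat := by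
    funext acc d
    rw [pvInner_spec low high _ (by positivity)]
    rfl
  simp only [getInvalidIds_alt]
  rw [hstep, PySem.List.foldl_append_eq_flatMap]
  rfl

lemma pvBlock_mem {low high : Int} {k : Nat} {x : Int} :
    x ∈ pvBlock low high k ↔
      (low ≤ x ∧ x ≤ high) ∧ ∃ h : Nat, 10 ^ (k - 1) ≤ h ∧ h < 10 ^ k ∧ x = ((h * (10 ^ k + 1) : Nat) : Int) := by
  simp only [pvBlock, List.mem_filter, List.mem_map, pvIntRange_mem, decide_eq_true_eq]
  constructor
  · rintro ⟨⟨y, ⟨hy1, hy2⟩, rfl⟩, hb⟩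
    have hy0 : 0 ≤ y := le_trans (by positivity) hy1
    refine ⟨hb, y.toNat, ?_, ?_, ?_⟩
    · have : ((10 ^ (k-1) : Nat) : Int) ≤ y := by push_cast; exact hy1
      omega
    · have hx : y < (10:Int) ^ k := by
        have h10 : (0:Int) < 10 ^ (k-1) := by positivity
        omega
      have : y < ((10 ^ k : Nat) : Int) := by push_cast; exact hx
      omega
    · push_cast
      rw [Int.toNat_of_nonneg hy0]
      try ring
  · rintro ⟨hb, h, hh1, hh2, rfl⟩
    refine ⟨⟨(h : Int), ⟨?_, ?_⟩, by push_cast; ring⟩, hb⟩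
    · calc (10:Int) ^ (k-1) = ((10 ^ (k-1) : Nat) : Int) := by push_cast; ring
        _ ≤ (h : Int) := by exact_mod_cast hh1
    · have : (h : Int) < ((10 ^ k : Nat) : Int) := by exact_mod_cast hh2
      have h2 : ((10 ^ k : Nat) : Int) = (10:Int) ^ k := by push_cast; ring
      have h3 : (0:Int) ≤ (10:Int) ^ (k-1) := by positivity
      omega

-- ---- decimal digit facts ----
lemma pvToDigitsCore_eq : ∀ (fuel n : Nat) (acc : List Char), 0 < n → n < fuel →
    Nat.toDigitsCore 10 fuel n acc = ((Nat.digits 10 n).map Nat.digitChar).reverse ++ acc := by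
  intro fuel
  induction fuel with
  | zero => intro n acc h1 h2; omega
  | succ fuel ih =>
    intro n acc h1 h2
    rw [Nat.toDigitsCore]
    have hdig : Nat.digits 10 n = n % 10 :: Nat.digits 10 (n / 10) := Nat.digits_def' (by norm_num) h1
    by_cases hq : n / 10 = 0
    · rw [if_pos hq]
      rw [hdig, hq]
      simp
    · rw [if_neg hq]
      rw [ih (n / 10) _ (by omega) (by omega)]
      rw [hdig]
      simp

lemma pvToDigits_eq (n : Nat) (hn : n ≠ 0) :
    Nat.toDigits 10 n = ((Nat.digits 10 n).map Nat.digitChar).reverse := by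
  unfold Nat.toDigits
  rw [pvToDigitsCore_eq (n + 1) n [] (by omega) (by omega)]
  simp

lemma pvToChars_pos (i : Int) (h : 0 < i) :
    PySem.Int.toChars i = ((Nat.digits 10 i.toNat).map Nat.digitChar).reverse := by
  unfold PySem.Int.toChars
  rw [if_neg (by omega)]
  exact pvToDigits_eq i.toNat (by omega)

lemma pvDigitChar_ne_dash {x : Nat} (hx : x < 10) : Nat.digitChar x ≠ '-' := by
  have h : ∀ y : Fin 10, Nat.digitChar y.val ≠ '-' := by decide
  exact h ⟨x, hx⟩

lemma pvDigitChar_inj : ∀ x y : Nat, x < 10 → y < 10 → Nat.digitChar x = Nat.digitChar y → x = y := by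
  have h : ∀ x : Fin 10, ∀ y : Fin 10, Nat.digitChar x.val = Nat.digitChar y.val → x = y := by decide
  intro x y hx hy he
  have := h ⟨x, hx⟩ ⟨y, hy⟩ he
  exact congrArg Fin.val this

lemma pvMapDigitChar_inj : ∀ xs ys : List Nat, (∀ x ∈ xs, x < 10) → (∀ y ∈ ys, y < 10) →
    xs.map Nat.digitChar = ys.map Nat.digitChar → xs = ys := by
  intro xs
  induction xs with
  | nil => intro ys _ _ h; cases ys <;> simp_all
  | cons a xs ih =>
    intro ys hx hy h
    cases ys with
    | nil => simp_all
    | cons b ys =>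
      simp only [List.map_cons, List.cons.injEq] at h
      have ha := pvDigitChar_inj a b (hx a (by simp)) (hy b (by simp)) h.1
      rw [ha, ih ys (fun x hx' => hx x (by simp [hx'])) (fun y hy' => hy y (by simp [hy'])) h.2]

-- ---- the boolean test, reduced to the character list ----
lemma pvRevHalves (M : List Char) (k : Nat) (hlen : M.length = 2 * k) :
    (M.reverse.take k = M.reverse.drop k) ↔ M.take k = M.drop k := by
  rw [show M.reverse.take k = (M.drop k).reverse by rw [List.reverse_drop]; congr 1; omega,
    show M.reverse.drop k = (M.take k).reverse by rw [List.reverse_take]; congr 1; omega,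
    List.reverse_inj]
  exact eq_comm

lemma pvGetLast_ne_zero {xs : List Nat} (h : xs ≠ []) (h0 : xs.getLast? ≠ some 0) :
    xs.getLast h ≠ 0 := by
  rw [List.getLast?_eq_some_getLast h] at h0
  intro hc
  exact h0 (by rw [hc])

lemma pvP_iff (i : Int) :
    pvP i = true ↔
      (PySem.Int.toChars i).length % 2 = 0 ∧
      (PySem.Int.toChars i).take ((PySem.Int.toChars i).length / 2) =
        (PySem.Int.toChars i).drop ((PySem.Int.toChars i).length / 2) := by
  have hlen : PySem.Str.len (PySem.Int.toStr i) = (((PySem.Int.toChars i).length : Nat) : Int) := by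
    simp [PySem.Str.len, PySem.Int.toList_toStr]
  set L := (PySem.Int.toChars i).length with hL
  have hmod : PySem.Int.mod ((L : Nat) : Int) 2 = ((L % 2 : Nat) : Int) := by
    exact_mod_cast PySem.Int.mod_natCast L 2
  have hdiv : PySem.Int.truncdiv ((L : Nat) : Int) 2 = ((L / 2 : Nat) : Int) := by
    show Int.tdiv _ _ = _
    rw [Int.tdiv_eq_ediv, if_pos (Or.inl (by positivity))]
    omega
  have hslice1 : PySem.List.slice (PySem.Int.toStr i).toList none (some ((L / 2 : Nat) : Int)) =
      (PySem.Int.toChars i).take (L / 2) := by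
    rw [PySem.Int.toList_toStr]; exact PySem.List.slice_to_natCast _ _
  have hslice2 : PySem.List.slice (PySem.Int.toStr i).toList (some ((L / 2 : Nat) : Int)) none =
      (PySem.Int.toChars i).drop (L / 2) := by
    rw [PySem.Int.toList_toStr]; exact PySem.List.slice_from_natCast _ _
  simp only [pvP, pvIsValid, hlen, hmod, hdiv, hslice1, hslice2]
  by_cases hpar : L % 2 = 0
  · rw [if_neg (show ¬ ((L % 2 : Nat) : Int) ≠ 0 by omega)]
    simp [hpar]
  · rw [if_pos (show ((L % 2 : Nat) : Int) ≠ 0 by omega)]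
    simp [hpar]

-- ---- the key characterisation: A's test holds exactly on doubled halves ----
lemma pvNat_case (n : Nat) (hn : 0 < n) :
    ((Nat.digits 10 n).length % 2 = 0 ∧
      (((Nat.digits 10 n).map Nat.digitChar).reverse.take ((Nat.digits 10 n).length / 2) =
        ((Nat.digits 10 n).map Nat.digitChar).reverse.drop ((Nat.digits 10 n).length / 2))) ↔
    (∃ k h : Nat, 0 < k ∧ 10 ^ (k - 1) ≤ h ∧ h < 10 ^ k ∧ n = h * (10 ^ k + 1)) := by
  constructor
  · rintro ⟨hpar, heq⟩
    set L := Nat.digits 10 n with hLdef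
    have hlt : ∀ d ∈ L, d < 10 := fun d hd => Nat.digits_lt_base (by norm_num) hd
    set k := L.length / 2 with hk
    have hlen : L.length = 2 * k := by omega
    have hLne : L ≠ [] := Nat.digits_ne_nil_iff_ne_zero.mpr (by omega)
    have hk0 : 0 < k := by
      rcases Nat.eq_zero_or_pos k with h0 | h; swap; · exact h
      exact absurd (List.eq_nil_of_length_eq_zero (by omega)) hLne
    rw [pvRevHalves _ k (by rw [List.length_map]; omega)] at heq
    have heqL : L.take k = L.drop k := by
      apply pvMapDigitChar_inj
      · intro x hx; exact hlt x (List.mem_of_mem_take hx)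
      · intro x hx; exact hlt x (List.mem_of_mem_drop hx)
      · simpa [List.map_take, List.map_drop] using heq
    set T := L.take k with hT
    have hTlen : T.length = k := by rw [hT, List.length_take]; omega
    have hsplit : L = T ++ T := by
      conv_lhs => rw [← List.take_append_drop k L]
      rw [← heqL]
    have hTne : T ≠ [] := by
      intro h; rw [h] at hTlen; simp at hTlen; omega
    have hlast? : T.getLast? ≠ some 0 := by
      have h1 : L.getLast? ≠ some 0 := by
        rw [List.getLast?_eq_some_getLast hLne]
        intro hc
        exact Nat.getLast_digit_ne_zero 10 (show n ≠ 0 by omega) (by injection hc)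
      rw [hsplit, List.getLast?_append_of_ne_nil _ hTne] at h1
      exact h1
    have hTlast : ∀ h : T ≠ [], T.getLast h ≠ 0 := fun h => pvGetLast_ne_zero h hlast?
    set h := Nat.ofDigits 10 T with hh
    have hdig : Nat.digits 10 h = T :=
      Nat.digits_ofDigits 10 (by norm_num) T
        (fun l hl => hlt l (by rw [hsplit]; exact List.mem_append_left _ hl)) hTlast
    have hub : h < 10 ^ k :=
      (Nat.digits_length_le_iff (b := 10) (by norm_num) h).mp (by rw [hdig, hTlen])
    have hlb : 10 ^ (k - 1) ≤ h :=
      (Nat.lt_digits_length_iff (b := 10) (k := k - 1) (by norm_num) h).mp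
        (by rw [hdig, hTlen]; omega)
    refine ⟨k, h, hk0, hlb, hub, ?_⟩
    have hof : n = Nat.ofDigits 10 L := (Nat.ofDigits_digits 10 n).symm
    rw [hof, hsplit, Nat.ofDigits_append, hTlen, ← hh]
    ring
  · rintro ⟨k, h, hk0, hlb, hub, rfl⟩
    have hh0 : h ≠ 0 := by
      have : 0 < 10 ^ (k - 1) := by positivity
      omega
    set T := Nat.digits 10 h with hT
    have hTlen : T.length = k := by
      have h1 : T.length ≤ k := (Nat.digits_length_le_iff (by norm_num) h).mpr hub
      have h2 : k - 1 < T.length :=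
        (Nat.lt_digits_length_iff (b := 10) (k := k - 1) (by norm_num) h).mpr hlb
      omega
    have hTne : T ≠ [] := Nat.digits_ne_nil_iff_ne_zero.mpr hh0
    have hTlt : ∀ l ∈ T ++ T, l < 10 := by
      intro l hl
      rcases List.mem_append.mp hl with h' | h' <;> exact Nat.digits_lt_base (by norm_num) h'
    have hlast : ∀ hne : T ++ T ≠ [], (T ++ T).getLast hne ≠ 0 := by
      intro hne
      apply pvGetLast_ne_zero
      rw [List.getLast?_append_of_ne_nil _ hTne, List.getLast?_eq_some_getLast hTne]
      intro hc
      exact Nat.getLast_digit_ne_zero 10 hh0 (by injection hc)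
    have hof : Nat.ofDigits 10 (T ++ T) = h * (10 ^ k + 1) := by
      rw [Nat.ofDigits_append, hTlen, hT, Nat.ofDigits_digits]
      ring
    have hdig : Nat.digits 10 (h * (10 ^ k + 1)) = T ++ T := by
      rw [← hof]
      exact Nat.digits_ofDigits 10 (by norm_num) _ hTlt hlast
    rw [hdig]
    have hlen2 : (T ++ T).length = 2 * k := by rw [List.length_append, hTlen]; omega
    refine ⟨by omega, ?_⟩
    rw [show (T ++ T).length / 2 = k by omega]
    rw [pvRevHalves _ k (by rw [List.length_map, List.length_append, hTlen]; omega)]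
    rw [← List.map_take, ← List.map_drop,
      show (T ++ T).take k = T by rw [← hTlen, List.take_left],
      show (T ++ T).drop k = T by rw [← hTlen, List.drop_left]]

lemma pvP_iff_dbl (i : Int) : pvP i = true ↔ pvIsDbl i := by
  rw [pvP_iff]
  rcases lt_trichotomy i 0 with hneg | hzero | hpos
  · -- negative: the string starts with '-', a doubled string cannot
    constructor
    · rintro ⟨hpar, heq⟩
      exfalso
      have hcs : PySem.Int.toChars i = '-' :: Nat.toDigits 10 i.natAbs := by
        unfold PySem.Int.toChars; rw [if_pos hneg]
      set ds := Nat.toDigits 10 i.natAbs with hds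
      rw [hcs] at hpar heq
      simp only [List.length_cons] at hpar heq
      have hds1 : 1 ≤ ds.length := by omega
      obtain ⟨k', hk'⟩ : ∃ k', (ds.length + 1) / 2 = k' + 1 := ⟨(ds.length + 1) / 2 - 1, by omega⟩
      rw [hk', List.take_succ_cons, List.drop_succ_cons] at heq
      have hmem : '-' ∈ ds := List.mem_of_mem_drop (heq ▸ List.mem_cons_self)
      rw [hds, pvToDigits_eq i.natAbs (by omega)] at hmem
      simp only [List.mem_reverse, List.mem_map] at hmem
      obtain ⟨x, hxm, hx⟩ := hmem
      exact pvDigitChar_ne_dash (Nat.digits_lt_base (by norm_num) hxm) hx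
    · rintro ⟨k, h, hk0, hlb, hub, rfl⟩
      exfalso
      have : (0 : Int) ≤ ((h * (10 ^ k + 1) : Nat) : Int) := Int.natCast_nonneg _
      omega
  · -- zero: "0" has odd length; 0 is not a doubled number
    subst hzero
    constructor
    · rintro ⟨hpar, _⟩
      exfalso
      have h0 : PySem.Int.toChars 0 = ['0'] := by decide
      rw [h0] at hpar
      simp at hpar
    · rintro ⟨k, h, hk0, hlb, hub, h0⟩
      exfalso
      have h1 : 0 < 10 ^ (k - 1) := by positivity
      have h2 : 0 < h * (10 ^ k + 1) := Nat.mul_pos (by omega) (by positivity)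
      omega
  · rw [pvToChars_pos i hpos]
    have hlen : (((Nat.digits 10 i.toNat).map Nat.digitChar).reverse).length
        = (Nat.digits 10 i.toNat).length := by simp
    rw [hlen]
    have hn0 : 0 < i.toNat := by omega
    constructor
    · rintro ⟨hpar, heq⟩
      obtain ⟨k, h, hk0, hlb, hub, hn⟩ := (pvNat_case i.toNat hn0).mp ⟨hpar, heq⟩
      exact ⟨k, h, hk0, hlb, hub, by omega⟩
    · rintro ⟨k, h, hk0, hlb, hub, hi⟩
      exact (pvNat_case i.toNat hn0).mpr ⟨k, h, hk0, hlb, hub, by omega⟩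

-- ---- the length of str(high) admits every half that can fit below high ----
lemma pvMaxHalf_le {high : Int} {k h : Nat} (hk : 0 < k) (hlb : 10 ^ (k - 1) ≤ h)
    (hx : ((h * (10 ^ k + 1) : Nat) : Int) ≤ high) :
    (k : Int) ≤ PySem.Int.floordiv (PySem.Str.len (PySem.Int.toStr high)) 2 := by
  have hlow : (10 : Nat) ^ (2 * k - 1) ≤ h * (10 ^ k + 1) := by
    calc (10:Nat) ^ (2 * k - 1) = 10 ^ (k - 1) * 10 ^ k := by
          rw [← pow_add]; congr 1; omega
      _ ≤ h * 10 ^ k := Nat.mul_le_mul_right _ hlb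
      _ ≤ h * (10 ^ k + 1) := Nat.mul_le_mul_left _ (by omega)
  have hpos : 0 < high := by
    have h1 : (0:Nat) < 10 ^ (2*k-1) := by positivity
    omega
  have hhigh : (10 : Nat) ^ (2 * k - 1) ≤ high.toNat := by omega
  have hlen : (Nat.digits 10 high.toNat).length ≥ 2 * k := by
    have := (Nat.lt_digits_length_iff (b := 10) (by norm_num) high.toNat).mpr hhigh
    omega
  have hstr : PySem.Str.len (PySem.Int.toStr high) = ((Nat.digits 10 high.toNat).length : Int) := by
    simp [PySem.Str.len, PySem.Int.toList_toStr, pvToChars_pos high hpos]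
  rw [hstr]
  set L := (Nat.digits 10 high.toNat).length with hL
  have : PySem.Int.floordiv ((L : Nat) : Int) 2 = ((L / 2 : Nat) : Int) := by
    exact_mod_cast PySem.Int.floordiv_natCast L 2
  rw [this]
  have : k ≤ L / 2 := by omega
  exact_mod_cast this

lemma mem_getInvalidIds_alt {low high x : Int} :
    x ∈ getInvalidIds_alt low high ↔ (low ≤ x ∧ x ≤ high) ∧ pvIsDbl x := by
  rw [getInvalidIds_alt_eq]
  simp only [List.mem_flatMap, PySem.List.mem_pyRange_one]
  constructor
  · rintro ⟨d, ⟨hd1, _⟩, hx⟩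
    obtain ⟨hb, h, hh1, hh2, rfl⟩ := pvBlock_mem.mp hx
    exact ⟨hb, d.toNat, h, by omega, hh1, hh2, rfl⟩
  · rintro ⟨hb, k, h, hk0, hlb, hub, rfl⟩
    refine ⟨(k : Int), ⟨by exact_mod_cast hk0, ?_⟩, ?_⟩
    · have := pvMaxHalf_le hk0 hlb hb.2
      omega
    · rw [show ((k : Int)).toNat = k from Int.toNat_natCast k]
      exact pvBlock_mem.mpr ⟨hb, h, hlb, hub, rfl⟩

-- ---- B's output is strictly increasing ----
lemma pvBlock_bounds {low high : Int} {k : Nat} {x : Int} (hx : x ∈ pvBlock low high k) :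
    ((10 ^ (k - 1) * (10 ^ k + 1) : Nat) : Int) ≤ x ∧ x ≤ (((10 ^ k - 1) * (10 ^ k + 1) : Nat) : Int) := by
  obtain ⟨_, h, hh1, hh2, rfl⟩ := pvBlock_mem.mp hx
  have h1 : 10 ^ (k-1) * (10 ^ k + 1) ≤ h * (10 ^ k + 1) := Nat.mul_le_mul_right _ hh1
  have h2 : h * (10 ^ k + 1) ≤ (10 ^ k - 1) * (10 ^ k + 1) := by
    apply Nat.mul_le_mul_right
    have : 0 < 10 ^ (k-1) := by positivity
    omega
  exact ⟨by exact_mod_cast h1, by exact_mod_cast h2⟩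

lemma pvBlock_cross {low high : Int} {k1 k2 : Nat} (hk : k1 < k2) (hk1 : 0 < k1) {x y : Int}
    (hx : x ∈ pvBlock low high k1) (hy : y ∈ pvBlock low high k2) : x < y := by
  have h1 := (pvBlock_bounds hx).2
  have h2 := (pvBlock_bounds hy).1
  have key : (10 ^ k1 - 1) * (10 ^ k1 + 1) < 10 ^ (k2 - 1) * (10 ^ k2 + 1) := by
    have ha : (1:Nat) ≤ 10 ^ k1 := Nat.one_le_pow _ _ (by norm_num)
    have hab : (10:Nat) ^ k1 ≤ 10 ^ (k2 - 1) := Nat.pow_le_pow_right (by norm_num) (by omega)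
    have hbc : (10:Nat) ^ k2 = 10 ^ (k2 - 1) * 10 ^ 1 := by rw [← pow_add]; congr 1; omega
    have hsq : (10:Nat) ^ k1 * 10 ^ k1 ≤ 10 ^ (k2-1) * 10 ^ (k2-1) := Nat.mul_le_mul hab hab
    calc (10 ^ k1 - 1) * (10 ^ k1 + 1) < 10 ^ k1 * 10 ^ k1 := by
          have := Nat.sub_lt (show 0 < 10 ^ k1 by positivity) one_pos
          nlinarith [ha]
      _ ≤ 10 ^ (k2-1) * 10 ^ (k2-1) := hsq
      _ ≤ 10 ^ (k2-1) * (10 ^ k2 + 1) := by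
          apply Nat.mul_le_mul_left
          rw [hbc]; nlinarith [Nat.one_le_pow (k2-1) 10 (by norm_num)]
  have : (((10 ^ k1 - 1) * (10 ^ k1 + 1) : Nat) : Int) < ((10 ^ (k2-1) * (10 ^ k2 + 1) : Nat) : Int) := by
    exact_mod_cast key
  omega

lemma pvBlock_pairwise (low high : Int) (k : Nat) : (pvBlock low high k).Pairwise (· < ·) := by
  unfold pvBlock
  refine List.Pairwise.sublist List.filter_sublist ?_
  refine (List.pairwise_map).mpr ((pvIntRange_pairwise _ _).imp ?_)
  intro a b hab
  have hm : (0:Int) < (10:Int) ^ k + 1 := by positivity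
  exact mul_lt_mul_of_pos_right hab hm

lemma pvPyRange_pairwise : ∀ (n : Nat) (a b : Int), (b - a).toNat = n →
    (PySem.List.pyRange a b).Pairwise (· < ·) := by
  intro n
  induction n with
  | zero =>
    intro a b hn
    have : PySem.List.pyRange a b = [] := by
      apply List.eq_nil_iff_forall_not_mem.mpr
      intro x hx
      rw [PySem.List.mem_pyRange_one] at hx
      omega
    rw [this]; exact List.Pairwise.nil
  | succ n ih =>
    intro a b hn
    rw [PySem.List.pyRange_one_cons (by omega)]
    refine List.Pairwise.cons ?_ (ih (a+1) b (by omega))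
    intro x hx
    rw [PySem.List.mem_pyRange_one] at hx
    omega

lemma getInvalidIds_alt_pairwise (low high : Int) : (getInvalidIds_alt low high).Pairwise (· < ·) := by
  rw [getInvalidIds_alt_eq]
  rw [List.flatMap_def]
  rw [List.pairwise_flatten]
  set b := PySem.Int.floordiv (PySem.Str.len (PySem.Int.toStr high)) 2 + 1 with hb
  refine ⟨?_, ?_⟩
  · intro l hl
    simp only [List.mem_map] at hl
    obtain ⟨d, _, rfl⟩ := hl
    exact pvBlock_pairwise low high d.toNat
  · rw [List.pairwise_map]
    have hpw := pvPyRange_pairwise (b - 1).toNat 1 b rfl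
    refine hpw.imp_of_mem ?_
    intro d1 d2 h1 h2 hlt x hx y hy
    have hd1 : 1 ≤ d1 := (PySem.List.mem_pyRange_one.mp h1).1
    exact pvBlock_cross (k1 := d1.toNat) (k2 := d2.toNat) (by omega) (by omega) hx hy

-- ===== VERDICT (by name: the statement is the Claim_ definition above) =====
theorem getInvalidIds_spec : Claim_equal_getInvalidIds := by
  intro low high _
  unfold Spec_getInvalidIds
  have pwA := getInvalidIds_pairwise low high
  have pwB := getInvalidIds_alt_pairwise low high
  have hmem : ∀ x, x ∈ getInvalidIds low high ↔ x ∈ getInvalidIds_alt low high := by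
    intro x
    rw [mem_getInvalidIds, mem_getInvalidIds_alt, pvP_iff_dbl]
  have hperm : (getInvalidIds low high).Perm (getInvalidIds_alt low high) := by
    apply (List.perm_ext_iff_of_nodup ?_ ?_).mpr hmem
    · exact pwA.imp ne_of_lt
    · exact pwB.imp ne_of_lt
  exact List.Perm.eq_of_pairwise (fun a b _ _ hab hba => absurd hba (lt_asymm hab)) pwA pwB hperm
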